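-- pv_equiv track=rewrite | github.com/codpro880/leetcode | problems/python/problem8.py | grab_until_digits_stop
-- ===== SOURCE A (Python) =====
-- def grab_until_digits_stop(no_whitespace):
--     result = []
--     for char in no_whitespace:
--         if char in [str(digit) for digit in range(10)]:
--             result.append(char)
--         else:
--             break
--
--     return "".join(result)
-- ===== SOURCE B (Python) =====
-- import re
--
-- def grab_until_digits_stop(no_whitespace):
--     return re.match(r'[0-9]*', no_whitespace).group()
-- ===== Notes on version B (the rewrite author's own statement) =====
-- stated objective: idiomatic
-- what changed: Replaces the explicit accumulate-and-break loop (which rebuilds the ['0'..'9'] list on every character) by a single anchored regex match re.match(r'[0-9]*', s).group() capturing the leading ASCII-digit run.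
import Mathlib
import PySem

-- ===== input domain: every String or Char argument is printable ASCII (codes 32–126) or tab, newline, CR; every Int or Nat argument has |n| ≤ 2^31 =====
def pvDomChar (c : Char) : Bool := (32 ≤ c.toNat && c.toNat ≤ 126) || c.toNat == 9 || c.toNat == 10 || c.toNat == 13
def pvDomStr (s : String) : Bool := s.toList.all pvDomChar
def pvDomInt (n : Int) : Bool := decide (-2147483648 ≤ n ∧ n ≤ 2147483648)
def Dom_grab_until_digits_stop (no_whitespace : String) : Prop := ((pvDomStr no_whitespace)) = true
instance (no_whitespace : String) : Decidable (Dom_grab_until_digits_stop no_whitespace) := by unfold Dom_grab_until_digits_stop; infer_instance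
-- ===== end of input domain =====

-- B replaces A's accumulate-and-break loop by an anchored regex match for the leading ASCII-digit run (objective: idiomatic; return value only).


-- ===== PORT A =====
-- literal port of A: fold over the characters with an accumulator and a break flag;
-- the membership test 'char in [str(d) for d in range(10)]' is the list of digit chars
def pvDigitsList : List Char := (PySem.List.pyRange 0 10 1).map (fun d => (PySem.Int.toStr d).toList.headD ' ')

def grab_until_digits_stop_loop (chars : List Char) (result : List Char) : List Char :=
  match chars with
  | [] => result
  | c :: rest =>
    if c ∈ pvDigitsList then grab_until_digits_stop_loop rest (result ++ [c])
    else result  -- break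

def grab_until_digits_stop (no_whitespace : String) : String :=
  String.ofList (grab_until_digits_stop_loop no_whitespace.toList [])

-- ===== PORT B =====
-- port of B: re.match(r'[0-9]*', s).group() = the longest leading run of chars in '0'..'9'
def grab_until_digits_stop_alt (no_whitespace : String) : String :=
  String.ofList (no_whitespace.toList.takeWhile (fun c => '0' ≤ c && c ≤ '9'))

-- ===== PRECONDITION & SPEC =====
def Spec_grab_until_digits_stop (no_whitespace : String) (out : String) : Prop := out = grab_until_digits_stop_alt no_whitespace
instance (no_whitespace : String) (out : String) : Decidable (Spec_grab_until_digits_stop no_whitespace out) := by unfold Spec_grab_until_digits_stop; infer_instance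

-- ===== CLAIM (what is proved, stated in full; the proofs are below) =====
def Claim_equal_grab_until_digits_stop : Prop := ∀ (no_whitespace : String), Dom_grab_until_digits_stop no_whitespace → Spec_grab_until_digits_stop no_whitespace (grab_until_digits_stop no_whitespace)

-- ===== LEMMAS AND PROOFS =====
lemma pvDigitsList_eq : pvDigitsList = ['0','1','2','3','4','5','6','7','8','9'] := by decide

lemma digit_char_cases (c : Char) (h1 : '0' ≤ c) (h2 : c ≤ '9') :
    c = '0' ∨ c = '1' ∨ c = '2' ∨ c = '3' ∨ c = '4' ∨ c = '5' ∨ c = '6' ∨ c = '7' ∨ c = '8' ∨ c = '9' := by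
  have h1' : 48 ≤ c.toNat := h1
  have h2' : c.toNat ≤ 57 := h2
  have hn : c.toNat = 48 ∨ c.toNat = 49 ∨ c.toNat = 50 ∨ c.toNat = 51 ∨ c.toNat = 52 ∨
      c.toNat = 53 ∨ c.toNat = 54 ∨ c.toNat = 55 ∨ c.toNat = 56 ∨ c.toNat = 57 := by omega
  rcases hn with h|h|h|h|h|h|h|h|h|h <;>
    [left; (right;left); (right;right;left); (right;right;right;left);
     (right;right;right;right;left); (right;right;right;right;right;left);
     (right;right;right;right;right;right;left);
     (right;right;right;right;right;right;right;left);
     (right;right;right;right;right;right;right;right;left);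
     (right;right;right;right;right;right;right;right;right)] <;>
    exact Char.ext (UInt32.toNat_inj.mp h)

lemma mem_digits_iff (c : Char) : (c ∈ pvDigitsList) ↔ (('0' ≤ c && c ≤ '9') = true) := by
  rw [pvDigitsList_eq]
  constructor
  · intro h; fin_cases h <;> decide
  · intro h
    simp only [Bool.and_eq_true, decide_eq_true_eq] at h
    rcases digit_char_cases c h.1 h.2 with h|h|h|h|h|h|h|h|h|h <;> subst h <;> decide

lemma loop_eq (chars acc : List Char) :
    grab_until_digits_stop_loop chars acc = acc ++ chars.takeWhile (fun c => '0' ≤ c && c ≤ '9') := by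
  induction chars generalizing acc with
  | nil => simp [grab_until_digits_stop_loop]
  | cons c rest ih =>
    simp only [grab_until_digits_stop_loop, List.takeWhile]
    by_cases hmemb : c ∈ pvDigitsList
    · rw [if_pos hmemb, ih, (mem_digits_iff c).mp hmemb]; simp
    · have hb : ¬ (('0' ≤ c && c ≤ '9') = true) := fun h => hmemb ((mem_digits_iff c).mpr h)
      rw [if_neg hmemb]
      simp [hb]

-- ===== VERDICT (by name: the statement is the Claim_ definition above) =====
theorem grab_until_digits_stop_spec : Claim_equal_grab_until_digits_stop := by
  intro s _
  unfold Spec_grab_until_digits_stop grab_until_digits_stop grab_until_digits_stop_alt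
  rw [loop_eq]
  simp
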